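-- pv_equiv track=rewrite | github.com/FlorencioNatan/leetcode_solutions | 347_Top_K_Frequent_Elements/Solution.py | _create_nums_frenquecy_array
-- ===== SOURCE A (Python) =====
-- from typing import List, Tuple
--
-- def _create_nums_frenquecy_array(nums: List[int]) -> List[Tuple[int, int]]:
--     numsFrequency = dict()
--     for i in nums:
--         if (i not in numsFrequency):
--             numsFrequency[i] = 1
--         else:
--             numsFrequency[i] += 1
--     return list(numsFrequency.items())
-- ===== SOURCE B (Python) =====
-- from typing import List, Tuple
--
-- def _create_nums_frenquecy_array(nums: List[int]) -> List[Tuple[int, int]]: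
--     # distinct elements in first-appearance order, then count each in a second pass
--     return [(x, nums.count(x)) for x in dict.fromkeys(nums)]
-- ===== Notes on version B (the rewrite author's own statement) =====
-- stated objective: alternative
-- what changed: Replaces the incremental dict-counter loop with a two-phase scheme: dict.fromkeys collects the distinct elements in first-appearance order, then a second pass pairs each distinct x with nums.count(x).
import Mathlib
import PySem

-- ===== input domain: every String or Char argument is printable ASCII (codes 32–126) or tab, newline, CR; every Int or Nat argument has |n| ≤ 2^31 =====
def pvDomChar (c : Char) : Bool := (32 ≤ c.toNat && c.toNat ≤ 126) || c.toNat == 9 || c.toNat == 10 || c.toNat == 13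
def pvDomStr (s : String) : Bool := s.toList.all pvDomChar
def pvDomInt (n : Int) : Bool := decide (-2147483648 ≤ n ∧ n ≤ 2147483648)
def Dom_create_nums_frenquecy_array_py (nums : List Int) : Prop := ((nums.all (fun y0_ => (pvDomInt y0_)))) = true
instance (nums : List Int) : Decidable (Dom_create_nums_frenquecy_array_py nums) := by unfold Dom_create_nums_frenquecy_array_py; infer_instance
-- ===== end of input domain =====

-- B replaces A's incremental dict-counter loop with a two-phase scheme (dedup in first-appearance
-- order, then count each distinct element in a second pass); alternative decomposition, not faster.

-- ===== PORT A =====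
-- Port of A: dict-counter loop (insert 1 on first sight, else +1), then list(items()).
def create_nums_frenquecy_array_py (nums : List Int) : List (Int × Int) :=
  (nums.foldl
    (fun d i =>
      if d.contains i = false then d.insert i 1
      else d.modify i 0 (· + 1))
    PySem.Dict.empty).items

-- ===== PORT B =====
-- Port of B: dict.fromkeys dedup (first-appearance order), then pair each with nums.count(x).
def create_nums_frenquecy_array_py_alt (nums : List Int) : List (Int × Int) :=
  (PySem.List.dedup nums).map (fun x => (x, (PySem.List.count nums x : Int)))

-- ===== PRECONDITION & SPEC =====
def Spec_create_nums_frenquecy_array_py (nums : List Int) (out : List (Int × Int)) : Prop := out = create_nums_frenquecy_array_py_alt nums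
instance (nums : List Int) (out : List (Int × Int)) : Decidable (Spec_create_nums_frenquecy_array_py nums out) := by unfold Spec_create_nums_frenquecy_array_py; infer_instance

-- ===== CLAIM (what is proved, stated in full; the proofs are below) =====
def Claim_equal_create_nums_frenquecy_array_py : Prop := ∀ (nums : List Int), Dom_create_nums_frenquecy_array_py nums → Spec_create_nums_frenquecy_array_py nums (create_nums_frenquecy_array_py nums)

-- ===== LEMMAS AND PROOFS =====

-- A's loop step agrees with the Counter step on every dict.
lemma stepA_eq_counter_step (d : PySem.Dict Int Int) (i : Int) :
    (if d.contains i = false then d.insert i 1 else d.modify i 0 (· + 1))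
      = d.modify i 0 (· + 1) := by
  by_cases h : d.contains i = false
  · simp only [h, if_pos]
    have : d.modify i 0 (· + 1) = d.insert i (d.getD i 0 + 1) := rfl
    have h0 : d.getD i 0 = 0 := by
      simp [PySem.Dict.getD_of_not_contains, h]
    rw [this, h0]; norm_num
  · simp [h]

-- ===== VERDICT (by name: the statement is the Claim_ definition above) =====
theorem create_nums_frenquecy_array_py_spec : Claim_equal_create_nums_frenquecy_array_py := by
  intro nums _
  unfold Spec_create_nums_frenquecy_array_py create_nums_frenquecy_array_py create_nums_frenquecy_array_py_alt
  have hA : nums.foldl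
      (fun d i => if d.contains i = false then d.insert i 1 else d.modify i 0 (· + 1))
      PySem.Dict.empty = PySem.Dict.counter nums := by
    rw [PySem.Dict.counter_eq_foldl]
    have h : (fun (d : PySem.Dict Int Int) i =>
        if d.contains i = false then d.insert i 1 else d.modify i 0 (· + 1))
        = fun d x => d.modify x 0 (· + 1) := by
      funext d i
      exact stepA_eq_counter_step d i
    rw [h]
  rw [hA, PySem.Dict.items_counter, PySem.List.dedup_eq_ofList]
  simp [PySem.List.count_eq]
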